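-- pv_equiv track=rewrite | github.com/hicann/cann-recipes-infer | executor/online/kv_transfer/transfer_manager.py | _group_concurrent_contiguous
-- ===== SOURCE A (Python) =====
-- def _group_concurrent_contiguous(src_pages: list[int], dst_pages: list[int]):
--     if not src_pages or not dst_pages:
--         return []
--     groups = []
--     current_src = [src_pages[0]]
--     current_dst = [dst_pages[0]]
--     for src, dst, prev_src, prev_dst in zip(
--         src_pages[1:], dst_pages[1:], src_pages, dst_pages
--     ):
--         if src == prev_src + 1 and dst == prev_dst + 1:
--             current_src.append(src)
--             current_dst.append(dst)
--         else:
--             groups.append((current_src, current_dst))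
--             current_src = [src]
--             current_dst = [dst]
--     groups.append((current_src, current_dst))
--     return groups
-- ===== SOURCE B (Python) =====
-- def _group_concurrent_contiguous(src_pages: list[int], dst_pages: list[int]):
--     # Zip once into a reversed stack and repeatedly peel a maximal contiguous
--     # run off its end; each run is unzipped into its (src, dst) group.
--     stack = list(zip(src_pages, dst_pages))
--     stack.reverse()
--     groups = []
--     while stack:
--         s, d = stack.pop()
--         run_src, run_dst = [s], [d]
--         while stack and stack[-1] == (run_src[-1] + 1, run_dst[-1] + 1):
--             s, d = stack.pop()
--             run_src.append(s)
--             run_dst.append(d)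
--         groups.append((run_src, run_dst))
--     return groups
-- ===== Notes on version B (the rewrite author's own statement) =====
-- stated objective: alternative
-- what changed: Replaces A's single fold over zip(src[1:],dst[1:],src,dst) that grows the current group with appends by zipping the inputs once into a reversed stack and repeatedly peeling a maximal contiguous run off it, unzipping each run into a group.
import Mathlib
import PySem

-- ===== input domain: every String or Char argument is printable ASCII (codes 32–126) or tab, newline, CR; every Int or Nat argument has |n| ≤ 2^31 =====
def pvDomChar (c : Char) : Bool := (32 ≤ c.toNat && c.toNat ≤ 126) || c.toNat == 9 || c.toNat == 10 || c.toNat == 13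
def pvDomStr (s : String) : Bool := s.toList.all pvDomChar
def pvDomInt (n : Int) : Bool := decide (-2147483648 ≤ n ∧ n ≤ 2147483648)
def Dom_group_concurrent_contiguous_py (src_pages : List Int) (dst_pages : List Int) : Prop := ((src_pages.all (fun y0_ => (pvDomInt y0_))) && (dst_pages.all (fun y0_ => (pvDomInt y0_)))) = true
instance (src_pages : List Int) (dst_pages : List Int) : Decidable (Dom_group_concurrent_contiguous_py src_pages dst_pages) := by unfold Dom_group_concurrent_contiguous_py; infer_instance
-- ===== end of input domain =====

-- B replaces A's four-way-zip fold with a zip-once stack from which maximal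
-- contiguous runs are peeled (objective: alternative decomposition; same cost).

-- ===== PORT A =====
-- A's for-loop over zip(src[1:], dst[1:], src, dst) with state (groups, current_src,
-- current_dst); the 4-tuples are encoded as nested pairs ((src, dst), (prev_src, prev_dst)).
def pvALoop : List ((Int × Int) × (Int × Int)) → List (List Int × List Int) → List Int → List Int → List (List Int × List Int)
  | [], groups, cs, cd => groups ++ [(cs, cd)]
  | ((s, d), (ps, pd)) :: rest, groups, cs, cd =>
      if s = ps + 1 ∧ d = pd + 1 then
        pvALoop rest groups (cs ++ [s]) (cd ++ [d])
      else
        pvALoop rest (groups ++ [(cs, cd)]) [s] [d]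

def group_concurrent_contiguous_py (src_pages : List Int) (dst_pages : List Int) : List (List Int × List Int) :=
  match src_pages, dst_pages with
  | [], _ => []
  | _, [] => []
  | s0 :: _, d0 :: _ =>
      pvALoop (((src_pages.drop 1).zip (dst_pages.drop 1)).zip (src_pages.zip dst_pages))
        [] [s0] [d0]

-- ===== PORT B =====
-- Source B's reversed list popped from the end is consumed in original order, so the
-- stack is the zipped list consumed from the head. The inner while loop (state:
-- run_src, run_dst, stack; the check uses the last appended pair, here the
-- parameters) becomes the obvious structural recursion returning the appended
-- continuation of the run together with the remaining stack.
def pvPeel (lastS lastD : Int) (stack : List (Int × Int)) : (List Int × List Int) × List (Int × Int) :=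
  match stack with
  | (s, d) :: rest =>
      if (s, d) = (lastS + 1, lastD + 1) then
        let r := pvPeel s d rest
        ((s :: r.1.1, d :: r.1.2), r.2)
      else (([], []), (s, d) :: rest)
  | [] => (([], []), [])

theorem pvPeel_len (lastS lastD : Int) (stack : List (Int × Int)) :
    (pvPeel lastS lastD stack).2.length ≤ stack.length := by
  induction stack generalizing lastS lastD with
  | nil => simp [pvPeel]
  | cons p rest ih =>
      obtain ⟨s, d⟩ := p
      simp only [pvPeel]
      split
      · exact le_trans (ih s d) (Nat.le_succ _)
      · simp

-- Source B's outer while loop over the shrinking stack.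
def pvGo : List (Int × Int) → List (List Int × List Int)
  | [] => []
  | (s, d) :: stack =>
      let r := pvPeel s d stack
      (s :: r.1.1, d :: r.1.2) :: pvGo r.2
termination_by stack => stack.length
decreasing_by
  exact Nat.lt_succ_of_le (pvPeel_len s d stack)

def group_concurrent_contiguous_py_alt (src_pages : List Int) (dst_pages : List Int) : List (List Int × List Int) :=
  pvGo (src_pages.zip dst_pages)

-- ===== PRECONDITION & SPEC =====
def Spec_group_concurrent_contiguous_py (src_pages : List Int) (dst_pages : List Int) (out : List (List Int × List Int)) : Prop := out = group_concurrent_contiguous_py_alt src_pages dst_pages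
instance (src_pages : List Int) (dst_pages : List Int) (out : List (List Int × List Int)) : Decidable (Spec_group_concurrent_contiguous_py src_pages dst_pages out) := by unfold Spec_group_concurrent_contiguous_py; infer_instance

-- ===== CLAIM (what is proved, stated in full; the proofs are below) =====
def Claim_equal_group_concurrent_contiguous_py : Prop := ∀ (src_pages : List Int) (dst_pages : List Int), Dom_group_concurrent_contiguous_py src_pages dst_pages → Spec_group_concurrent_contiguous_py src_pages dst_pages (group_concurrent_contiguous_py src_pages dst_pages)

-- ===== LEMMAS AND PROOFS =====

-- A's loop over the adjacent-pairs list `t.zip ((ls, ld) :: t)` equals peeling one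
-- maximal run (continuing from (ls, ld)) and then B's outer loop on the remainder.
theorem pvALoop_eq_peel (t : List (Int × Int)) (ls ld : Int) (cs cd : List Int)
    (groups : List (List Int × List Int)) :
    pvALoop (t.zip ((ls, ld) :: t)) groups cs cd =
      groups ++ ((cs ++ (pvPeel ls ld t).1.1, cd ++ (pvPeel ls ld t).1.2)
        :: pvGo (pvPeel ls ld t).2) := by
  induction t generalizing ls ld cs cd groups with
  | nil => simp [pvALoop, pvPeel, pvGo]
  | cons p t' ih =>
      obtain ⟨s, d⟩ := p
      by_cases h : s = ls + 1 ∧ d = ld + 1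
      · have := ih s d (cs ++ [s]) (cd ++ [d]) groups
        simp only [List.zip_cons_cons, pvALoop, if_pos h, pvPeel] at *
        rw [this]
        have hp : ((s, d) = (ls + 1, ld + 1)) := by simp [h.1, h.2]
        simp [hp]
      · have := ih s d [s] [d] (groups ++ [(cs, cd)])
        simp only [List.zip_cons_cons, pvALoop, if_neg h, pvPeel] at *
        rw [this]
        have hp : ¬ ((s, d) = (ls + 1, ld + 1)) := by
          simpa [Prod.ext_iff] using h
        simp [hp, pvGo]

theorem zip_drop_one (src dst : List Int) :
    (src.drop 1).zip (dst.drop 1) = (src.zip dst).drop 1 := by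
  cases src with
  | nil => simp
  | cons a s => cases dst <;> simp

-- ===== VERDICT (by name: the statement is the Claim_ definition above) =====
theorem group_concurrent_contiguous_py_spec : Claim_equal_group_concurrent_contiguous_py := by
  intro src dst _
  unfold Spec_group_concurrent_contiguous_py group_concurrent_contiguous_py group_concurrent_contiguous_py_alt
  match src, dst with
  | [], _ => simp [pvGo]
  | a :: s, [] => simp [pvGo]
  | s0 :: s, d0 :: d =>
      simp only [zip_drop_one]
      have := pvALoop_eq_peel (s.zip d) s0 d0 [s0] [d0] []
      simp only [List.zip_cons_cons, List.drop_succ_cons, List.drop_zero] at *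
      rw [this]
      simp [pvGo]
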